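-- pv_equiv track=rewrite | github.com/adampolak/first-fit | runs/results/gen_153/main.py | expand_once
-- ===== SOURCE A (Python) =====
-- def zip_interleave(list_of_lists):
--     if not list_of_lists:
--         return []
--     m = max(len(lst) for lst in list_of_lists)
--     S=[]
--     for i in range(m):
--         for lst in list_of_lists:
--             if i < len(lst):
--                 S.append(lst[i])
--     return S
--
-- def expand_once(T, level):
--     lo=min(l for l,r in T)
--     hi=max(r for l,r in T)
--     delta=hi-lo
--     offsets=(2,6,10,14)
--     # build copies as separate lists (so we can interleave)
--     copies=[]
--     for idx,s in enumerate(offsets):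
--         off=delta*s - lo
--         seq=[(l+off,r+off) for l,r in T]
--         # occasionally reverse every other copy to break alignment
--         if (level % 2)==1 and (idx%2)==1:
--             seq=list(reversed(seq))
--         copies.append(seq)
--     # choose interleaving style by level: alternate 'zip' and 'block'
--     if (level % 2)==1:
--         S_copies = zip_interleave(copies)
--     else:
--         S_copies = []
--         for lst in copies:
--             S_copies.extend(lst)
--     # blockers remain long intervals appended at end (helps keep omega small)
--     blockers=[(1,5),(12,16),(4,9),(8,13)]
--     S = S_copies + [(delta*a, delta*b) for a,b in blockers]
--     return S
-- ===== SOURCE B (Python) =====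
-- def expand_once(T, level):
--     lo = min(l for l, r in T)
--     hi = max(r for l, r in T)
--     delta = hi - lo
--     offsets = (2, 6, 10, 14)
--     n = len(T)
--     S = []
--     if level % 2 == 1:
--         # fused zip-interleave: position-major, no intermediate copies lists
--         for i in range(n):
--             for idx, s in enumerate(offsets):
--                 off = delta * s - lo
--                 l, r = T[i] if idx % 2 == 0 else T[n - 1 - i]
--                 S.append((l + off, r + off))
--     else:
--         # block order: offset-major
--         for s in offsets:
--             off = delta * s - lo
--             for l, r in T:
--                 S.append((l + off, r + off))
--     S += [(delta * a, delta * b) for a, b in ((1, 5), (12, 16), (4, 9), (8, 13))]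
--     return S
-- ===== Notes on version B (the rewrite author's own statement) =====
-- stated objective: simpler
-- what changed: B drops the intermediate per-offset copies lists and the zip_interleave helper: it emits the output directly, position-major (indexing T[i] / T[n-1-i] for even/odd offset index) when the level is odd, and offset-major when even, then appends the scaled blockers.
-- outside the precondition, e.g. on expand_once([], 0): A raises ValueError, B raises ValueError
import Mathlib
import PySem

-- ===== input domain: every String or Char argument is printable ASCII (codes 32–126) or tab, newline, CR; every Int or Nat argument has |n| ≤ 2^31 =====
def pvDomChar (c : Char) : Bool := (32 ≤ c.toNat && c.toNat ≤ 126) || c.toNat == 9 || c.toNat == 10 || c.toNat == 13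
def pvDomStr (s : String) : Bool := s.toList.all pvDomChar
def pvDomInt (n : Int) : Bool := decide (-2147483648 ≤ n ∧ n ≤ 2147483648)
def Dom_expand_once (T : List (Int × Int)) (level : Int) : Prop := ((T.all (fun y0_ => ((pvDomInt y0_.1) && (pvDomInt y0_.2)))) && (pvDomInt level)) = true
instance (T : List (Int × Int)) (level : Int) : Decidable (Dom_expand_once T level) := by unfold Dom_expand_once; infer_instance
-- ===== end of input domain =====

-- B eliminates the copies lists and the zip_interleave helper, writing the output directly
-- (position-major for odd level, offset-major for even); same values, simpler structure.
-- Both A and B raise ValueError on empty T (min of empty sequence): excluded by Pre_.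

-- ===== PORT A =====
def zipInterleave (ls : List (List (Int × Int))) : List (Int × Int) :=
  if ls = [] then []
  else
    let m : Int := (PySem.List.max? (ls.map PySem.List.len) (fun x => x)).getD 0
    (PySem.List.pyRange 0 m 1).foldl (fun S i =>
      ls.foldl (fun S lst =>
        if i < PySem.List.len lst then
          match PySem.List.pyGet? lst i with
          | some x => S ++ [x]
          | none => S
        else S) S) []

def expand_once (T : List (Int × Int)) (level : Int) : List (Int × Int) :=
  match PySem.List.min? (T.map Prod.fst) (fun x => x),
        PySem.List.max? (T.map Prod.snd) (fun x => x) with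
  | some lo, some hi =>
    let delta := hi - lo
    let offsets : List Int := [2, 6, 10, 14]
    let copies := (PySem.List.enumerate offsets).foldl (fun cs p =>
      let off := delta * p.2 - lo
      let seq := T.map (fun q => (q.1 + off, q.2 + off))
      let seq := if PySem.Int.mod level 2 = 1 ∧ PySem.Int.mod p.1 2 = 1 then seq.reverse else seq
      cs ++ [seq]) []
    let S_copies :=
      if PySem.Int.mod level 2 = 1 then zipInterleave copies
      else copies.foldl (fun S lst => S ++ lst) []
    S_copies ++ ([(1, 5), (12, 16), (4, 9), (8, 13)] : List (Int × Int)).map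
      (fun p => (delta * p.1, delta * p.2))
  | _, _ => []  -- unreachable under Pre_ (Python raises ValueError on empty T)

-- ===== PORT B =====
def expand_once_alt (T : List (Int × Int)) (level : Int) : List (Int × Int) :=
  match PySem.List.min? (T.map Prod.fst) (fun x => x) with
  | none => []  -- unreachable under Pre_ (Python raises ValueError on empty T)
  | some lo =>
    match PySem.List.max? (T.map Prod.snd) (fun x => x) with
    | none => []
    | some hi =>
    let delta := hi - lo
    let n := T.length
    let offsets : List Int := [2, 6, 10, 14]
    let S :=
      if PySem.Int.mod level 2 = 1 then
        (List.range n).foldl (fun S i =>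
          (PySem.List.enumerate offsets).foldl (fun S p =>
            let off := delta * p.2 - lo
            let q := if PySem.Int.mod p.1 2 = 0 then T.getD i (0, 0) else T.getD (n - 1 - i) (0, 0)
            S ++ [(q.1 + off, q.2 + off)]) S) []
      else
        offsets.foldl (fun S s =>
          let off := delta * s - lo
          T.foldl (fun S q => S ++ [(q.1 + off, q.2 + off)]) S) []
    S ++ ([(1, 5), (12, 16), (4, 9), (8, 13)] : List (Int × Int)).map
      (fun p => (delta * p.1, delta * p.2))

-- ===== PRECONDITION & SPEC =====
-- Pre_ excludes exactly the empty list, on which Python's min() raises ValueError in both A and B.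
def Pre_expand_once (T : List (Int × Int)) (level : Int) : Prop := T ≠ []
instance (T : List (Int × Int)) (level : Int) : Decidable (Pre_expand_once T level) := by
  unfold Pre_expand_once; infer_instance

def pvWitness_expand_once : (List (Int × Int)) × Int := ([(0, 3), (1, 2)], 1)

def Spec_expand_once (T : List (Int × Int)) (level : Int) (out : List (Int × Int)) : Prop := out = expand_once_alt T level
instance (T : List (Int × Int)) (level : Int) (out : List (Int × Int)) : Decidable (Spec_expand_once T level out) := by unfold Spec_expand_once; infer_instance

-- ===== CLAIM (what is proved, stated in full; the proofs are below) =====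
def Claim_equal_expand_once : Prop := ∀ (T : List (Int × Int)) (level : Int), Dom_expand_once T level → Pre_expand_once T level → Spec_expand_once T level (expand_once T level)

-- ===== LEMMAS AND PROOFS =====

lemma flatten_map_singleton {X Y : Type} (f : X → Y) (T : List X) :
    (List.map (fun x => [f x]) T).flatten = T.map f := by
  induction T with
  | nil => rfl
  | cons h t ih => simp [ih]

-- zip_interleave on four lists of equal length n yields the position-major flatMap.
lemma zipInterleave_four (a b c d : List (Int × Int)) (n : Nat)
    (ha : a.length = n) (hb : b.length = n) (hc : c.length = n) (hd : d.length = n) :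
    zipInterleave [a, b, c, d] =
      (List.range n).flatMap (fun k =>
        [a.getD k (0,0), b.getD k (0,0), c.getD k (0,0), d.getD k (0,0)]) := by
  unfold zipInterleave
  rw [if_neg (by simp)]
  have hm : (PySem.List.max? ([a,b,c,d].map PySem.List.len) (fun x => x)).getD 0 = (n : Int) := by
    simp [PySem.List.max?_id_cons, ha, hb, hc, hd]
  simp only [hm, PySem.List.pyRange_zero_natCast, List.foldl_map]
  rw [PySem.List.foldl_congr_mem _ _
      (fun S k => S ++ [a.getD k (0,0), b.getD k (0,0), c.getD k (0,0), d.getD k (0,0)]) _ ?_]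
  · exact PySem.List.foldl_append_eq_flatMap _ _ _
  · intro S k hk
    simp only [List.mem_range] at hk
    simp [List.foldl, ha, hb, hc, hd, hk, List.getD_eq_getElem?_getD]

lemma expand_once_eq_alt (T : List (Int × Int)) (level : Int) (hT : T ≠ []) :
    expand_once T level = expand_once_alt T level := by
  rcases hmin : PySem.List.min? (T.map Prod.fst) (fun x => x) with _ | lo
  · rw [PySem.List.min?_eq_none_iff] at hmin; simp_all
  rcases hmax : PySem.List.max? (T.map Prod.snd) (fun x => x) with _ | hi
  · rw [PySem.List.max?_eq_none_iff] at hmax; simp_all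
  have hm2 : PySem.Int.mod level 2 = level % 2 := PySem.Int.mod_eq_emod_of_pos (by norm_num)
  by_cases hodd : level % 2 = 1
  · -- odd level: both sides become the position-major flatMap over List.range T.length
    simp only [expand_once, expand_once_alt, hmin, hmax, hm2, hodd,
      PySem.List.enumerate_cons, PySem.List.enumerate_nil, List.foldl, if_pos]
    have f1 : Int.fmod 1 2 = 1 := by decide
    have f3 : Int.fmod 3 2 = 1 := by decide
    norm_num [PySem.Int.mod, f1, f3]
    rw [zipInterleave_four _ _ _ _ T.length (by simp) (by simp) (by simp) (by simp)]
    rw [List.flatMap_def]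
    refine congrArg List.flatten (List.map_congr_left ?_)
    intro k hk
    simp only [List.mem_range] at hk
    have h1 : T.length - 1 - k < T.length := by omega
    simp [List.getD_eq_getElem?_getD, hk, h1]
  · -- even level: both sides are the offset-major concatenation of the four shifted copies
    simp [expand_once, expand_once_alt, hmin, hmax, hodd,
      PySem.List.enumerate_cons, PySem.List.enumerate_nil, List.foldl,
      flatten_map_singleton]


-- ===== VERDICT (by name: the statement is the Claim_ definition above) =====
theorem expand_once_spec : Claim_equal_expand_once := by
  intro T level _ hpre
  exact expand_once_eq_alt T level hpre
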